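-- pv_equiv track=rewrite | github.com/algowizzzz/auraneo4j_pinecone_aws_lovable | agent/nodes/master_synth.py | _organize_sub_summaries_by_topic
-- ===== SOURCE A (Python) =====
-- from typing import List
--
-- def _organize_sub_summaries_by_topic(sub_summaries: List[str], sub_tasks: List[dict]) -> List[tuple[str, str]]:
--     """
--     Organize sub-summaries with their topics in logical order.
--     Returns list of (topic, summary) tuples.
--     """
--     # Define logical order for financial topics
--     topic_priority = {
--         'market risk': 1,
--         'credit risk': 2,
--         'operational risk': 3,
--         'liquidity risk': 4,
--         'regulatory risk': 5,
--         'business strategy': 6,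
--         'financial performance': 7,
--         'competitive position': 8
--     }
--
--     # Pair summaries with their topics
--     topic_summary_pairs = []
--     for i, summary in enumerate(sub_summaries):
--         if i < len(sub_tasks):
--             topic = sub_tasks[i].get('topic', f'Topic {i+1}')
--         else:
--             topic = f'Topic {i+1}'
--         topic_summary_pairs.append((topic, summary))
--
--     # Sort by priority (known topics first, then alphabetical)
--     def sort_key(pair):
--         topic = pair[0].lower()
--         for key, priority in topic_priority.items():
--             if key in topic:
--                 return priority
--         return 999  # Unknown topics go last
--
--     return sorted(topic_summary_pairs, key=sort_key)
-- ===== SOURCE B (Python) =====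
-- from typing import List
--
-- def _organize_sub_summaries_by_topic(sub_summaries: List[str], sub_tasks: List[dict]) -> List[tuple[str, str]]:
--     """
--     Single-pass distribution sort: each (topic, summary) pair is appended to one
--     of 9 buckets (bucket j = first key whose substring is in the lowercased
--     topic, bucket 8 = no match), then the buckets are concatenated in order.
--     """
--     keys = ['market risk', 'credit risk', 'operational risk', 'liquidity risk',
--             'regulatory risk', 'business strategy', 'financial performance',
--             'competitive position']
--     buckets = [[] for _ in range(9)]
--     for i, summary in enumerate(sub_summaries):
--         topic = sub_tasks[i].get('topic') if i < len(sub_tasks) else None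
--         if topic is None:
--             topic = 'Topic %d' % (i + 1)
--         low = topic.lower()
--         j = 0
--         while j < 8 and keys[j] not in low:
--             j += 1
--         buckets[j].append((topic, summary))
--     out = []
--     for b in buckets:
--         out.extend(b)
--     return out
-- ===== Notes on version B (the rewrite author's own statement) =====
-- stated objective: alternative
-- what changed: Replaces A's build-pairs-then-comparison-sort with a single pass that appends each (topic, summary) pair into one of 9 buckets (index of the first matching key via a while-loop scan, 8 = no match) and then concatenates the buckets in order, which preserves the stable within-priority order without sorting.
import Mathlib
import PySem

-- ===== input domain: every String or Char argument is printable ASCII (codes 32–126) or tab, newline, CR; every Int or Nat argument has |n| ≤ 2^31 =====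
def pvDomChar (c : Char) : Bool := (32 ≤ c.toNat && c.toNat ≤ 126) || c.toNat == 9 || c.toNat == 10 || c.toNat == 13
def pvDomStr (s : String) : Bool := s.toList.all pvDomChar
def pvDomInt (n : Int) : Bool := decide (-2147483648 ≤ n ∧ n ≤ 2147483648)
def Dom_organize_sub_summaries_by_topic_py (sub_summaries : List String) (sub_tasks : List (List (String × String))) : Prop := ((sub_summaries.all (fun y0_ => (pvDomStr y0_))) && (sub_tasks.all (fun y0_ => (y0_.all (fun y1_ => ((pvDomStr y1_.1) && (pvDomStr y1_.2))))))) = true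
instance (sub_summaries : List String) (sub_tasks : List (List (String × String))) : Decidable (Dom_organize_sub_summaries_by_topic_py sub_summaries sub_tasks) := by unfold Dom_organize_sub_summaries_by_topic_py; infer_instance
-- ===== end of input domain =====

-- B replaces A's comparison sort by a single-pass distribution into 9 buckets
-- (first matching key's index, 8 = unknown) concatenated in order (objective: alternative).

-- ===== PORT A =====
def pvTopicPriority : List (String × Int) :=
  [("market risk", 1), ("credit risk", 2), ("operational risk", 3), ("liquidity risk", 4),
   ("regulatory risk", 5), ("business strategy", 6), ("financial performance", 7),
   ("competitive position", 8)]

-- sub_tasks[i].get('topic', f'Topic {i+1}') if i < len(sub_tasks) else f'Topic {i+1}'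
def pvTopicAt (sub_tasks : List (List (String × String))) (i : Int) : String :=
  if i < PySem.List.len sub_tasks then
    PySem.Dict.getD ⟨PySem.List.pyGetD sub_tasks i []⟩ "topic" ("Topic " ++ PySem.Int.toStr (i + 1))
  else "Topic " ++ PySem.Int.toStr (i + 1)

-- 'for key, priority in topic_priority.items(): if key in topic: return priority / return 999'
def pvPrioAux : List (String × Int) → String → Int
  | [], _ => 999
  | (k, p) :: rest, t => if PySem.Str.isIn k t then p else pvPrioAux rest t

def pvPrio (topic : String) : Int := pvPrioAux pvTopicPriority (PySem.Str.lower topic)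

-- append loop building the pairs, then sorted(pairs, key=sort_key)
def organize_sub_summaries_by_topic_py (sub_summaries : List String) (sub_tasks : List (List (String × String))) : List (String × String) :=
  PySem.List.sorted
    ((PySem.List.enumerate sub_summaries).foldl
      (fun acc is => acc ++ [(pvTopicAt sub_tasks is.1, is.2)]) [])
    (fun pair => pvPrio pair.1) false

-- ===== PORT B =====
-- keys = [...]  (B has only the key list, no priority numbers)
def altKeys : List String :=
  ["market risk", "credit risk", "operational risk", "liquidity risk",
   "regulatory risk", "business strategy", "financial performance", "competitive position"]

-- topic = sub_tasks[i].get('topic') if i < len(sub_tasks) else None; if topic is None: topic = 'Topic %d' % (i+1)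
def altTopic (sub_tasks : List (List (String × String))) (i : Int) : String :=
  match (if i < PySem.List.len sub_tasks
         then PySem.Dict.get? ⟨PySem.List.pyGetD sub_tasks i []⟩ "topic" else none) with
  | some t => t
  | none => "Topic " ++ PySem.Int.toStr (i + 1)

-- j = 0; while j < 8 and keys[j] not in low: j += 1   (recursion over the key list)
def altFindJ : List String → String → Nat
  | [], _ => 0
  | k :: rest, low => if PySem.Str.isIn k low then 0 else altFindJ rest low + 1

-- single pass appending each pair to buckets[j], then out.extend(b) over the buckets
def organize_sub_summaries_by_topic_py_alt (sub_summaries : List String) (sub_tasks : List (List (String × String))) : List (String × String) :=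
  ((PySem.List.enumerate sub_summaries).foldl
    (fun bs is =>
      let topic := altTopic sub_tasks is.1
      let j := altFindJ altKeys (PySem.Str.lower topic)
      bs.modify j (fun b => b ++ [(topic, is.2)]))
    [[], [], [], [], [], [], [], [], []]).foldl (fun out b => out ++ b) []

-- ===== PRECONDITION & SPEC =====
def Spec_organize_sub_summaries_by_topic_py (sub_summaries : List String) (sub_tasks : List (List (String × String))) (out : List (String × String)) : Prop := out = organize_sub_summaries_by_topic_py_alt sub_summaries sub_tasks
instance (sub_summaries : List String) (sub_tasks : List (List (String × String))) (out : List (String × String)) : Decidable (Spec_organize_sub_summaries_by_topic_py sub_summaries sub_tasks out) := by unfold Spec_organize_sub_summaries_by_topic_py; infer_instance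

-- ===== CLAIM =====
def Claim_equal_organize_sub_summaries_by_topic_py : Prop := ∀ (sub_summaries : List String) (sub_tasks : List (List (String × String))), Dom_organize_sub_summaries_by_topic_py sub_summaries sub_tasks → Spec_organize_sub_summaries_by_topic_py sub_summaries sub_tasks (organize_sub_summaries_by_topic_py sub_summaries sub_tasks)

-- ===== LEMMAS AND PROOFS =====

-- B's None-fallback topic equals A's .get-with-default topic
lemma altTopic_eq (st : List (List (String × String))) (i : Int) :
    altTopic st i = pvTopicAt st i := by
  unfold altTopic pvTopicAt
  rw [PySem.Dict.getD_eq_get?_getD]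
  split_ifs with h
  · cases PySem.Dict.get? (⟨PySem.List.pyGetD st i []⟩ : PySem.Dict String String) "topic" <;> rfl
  · rfl

-- the priority A returns, expressed through B's bucket index
def altG (j : Nat) : Int := if j < 8 then (j : Int) + 1 else 999

lemma altFindJ_lt (low : String) : altFindJ altKeys low < 9 := by
  simp only [altKeys, altFindJ]
  split_ifs <;> norm_num

lemma prio_eq (topic : String) :
    pvPrio topic = altG (altFindJ altKeys (PySem.Str.lower topic)) := by
  unfold pvPrio
  generalize PySem.Str.lower topic = low
  simp only [pvTopicPriority, altKeys, pvPrioAux, altFindJ]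
  split_ifs <;> simp [altG]

lemma altG_beq (n j : Nat) (hn : n < 9) (hj : j < 9) : (altG n == altG j) = (n == j) := by
  interval_cases n <;> interval_cases j <;> decide

lemma pvPrio_mem_altG (t : String) :
    pvPrio t ∈ [altG 0, altG 1, altG 2, altG 3, altG 4, altG 5, altG 6, altG 7, altG 8] := by
  rw [prio_eq]
  have h := altFindJ_lt (PySem.Str.lower t)
  revert h; generalize altFindJ altKeys (PySem.Str.lower t) = n; intro h
  interval_cases n <;> simp

lemma insertBy_append_not_before {α : Type} (before : α → α → Bool) (x : α) (as bs : List α)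
    (h : ∀ a ∈ as, before x a = false) :
    PySem.List.insertBy before x (as ++ bs) = as ++ PySem.List.insertBy before x bs := by
  induction as with
  | nil => simp
  | cons a as ih =>
      simp only [List.cons_append, PySem.List.insertBy, h a (by simp)]
      simp only [Bool.false_eq_true, if_false, List.cons.injEq, true_and]
      exact ih (fun a ha => h a (by simp [ha]))

lemma insertBy_forall_before {α : Type} (before : α → α → Bool) (x : α) (bs : List α)
    (h : ∀ b ∈ bs, before x b = true) :
    PySem.List.insertBy before x bs = x :: bs := by
  cases bs with
  | nil => rfl
  | cons b t => simp [PySem.List.insertBy, h b (by simp)]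

lemma flatMap_congr_mem {α β : Type} (ps : List α) (F G : α → List β)
    (h : ∀ p ∈ ps, F p = G p) : ps.flatMap F = ps.flatMap G := by
  induction ps with
  | nil => rfl
  | cons p ps ih => simp [List.flatMap_cons, h p (by simp), ih (fun q hq => h q (by simp [hq]))]

-- a stable sort by an Int key whose values all lie in a strictly increasing list ps
-- is the concatenation of the per-key buckets in the order of ps
lemma bucket_sorted {α : Type} (key : α → Int) (ps : List Int) (hps : ps.Pairwise (· < ·))
    (xs : List α) :
    (∀ x ∈ xs, key x ∈ ps) →
    PySem.List.sorted xs key false = ps.flatMap (fun p => xs.filter (fun x => key x == p)) := by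
  induction xs using List.reverseRecOn with
  | nil => intro _; simp [PySem.List.sorted]
  | append_singleton l x ih =>
      intro h
      rw [PySem.List.sorted_eq_foldl_insertBy, List.foldl_append, List.foldl_cons, List.foldl_nil,
        ← PySem.List.sorted_eq_foldl_insertBy, ih (fun y hy => h y (by simp [hy]))]
      obtain ⟨ps1, ps2, hsplit⟩ := List.append_of_mem (h x (by simp))
      subst hsplit
      have hp := List.pairwise_append.mp hps
      have h1 : ∀ p ∈ ps1, p < key x := fun p hp1 => hp.2.2 p hp1 (key x) (by simp)
      have h2 : ∀ p ∈ ps2, key x < p := fun p hp2 => (List.pairwise_cons.mp hp.2.1).1 p hp2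
      have key_of_mem : ∀ (p : Int) (y : α), y ∈ l.filter (fun z => key z == p) → key y = p := by
        intro p y hy
        simpa using (List.of_mem_filter hy)
      rw [List.flatMap_append, List.flatMap_cons]
      rw [insertBy_append_not_before _ _ _ _ (by
        intro a ha
        obtain ⟨p, hp1, ha⟩ := List.mem_flatMap.mp ha
        have := key_of_mem p a ha
        simp [this, not_lt.mpr (le_of_lt (h1 p hp1))])]
      rw [insertBy_append_not_before _ _ _ _ (by
        intro a ha
        have := key_of_mem (key x) a ha
        simp [this])]
      rw [insertBy_forall_before _ _ _ (by
        intro b hb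
        obtain ⟨p, hp2, hb⟩ := List.mem_flatMap.mp hb
        have := key_of_mem p b hb
        simp [this, h2 p hp2])]
      rw [flatMap_congr_mem ps1 _ (fun p => (l ++ [x]).filter (fun z => key z == p)) (by
        intro p hp1
        have : ¬ (key x == p) = true := by simp; exact ne_of_gt (h1 p hp1)
        simp [List.filter_append, this])]
      rw [flatMap_congr_mem ps2 _ (fun p => (l ++ [x]).filter (fun z => key z == p)) (by
        intro p hp2
        have : ¬ (key x == p) = true := by simp; exact ne_of_lt (h2 p hp2)
        simp [List.filter_append, this])]
      simp [List.filter_append]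

-- B's distribution fold: after the pass, bucket j holds exactly the pairs with index j, in order
lemma fold9 {β : Type} (J : β → Nat) (hJ : ∀ x, J x < 9) (xs : List β) :
    xs.foldl (fun bs x => bs.modify (J x) (fun b => b ++ [x]))
      ([[], [], [], [], [], [], [], [], []] : List (List β)) =
    [xs.filter (fun x => J x == 0), xs.filter (fun x => J x == 1), xs.filter (fun x => J x == 2),
     xs.filter (fun x => J x == 3), xs.filter (fun x => J x == 4), xs.filter (fun x => J x == 5),
     xs.filter (fun x => J x == 6), xs.filter (fun x => J x == 7), xs.filter (fun x => J x == 8)] := by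
  induction xs using List.reverseRecOn with
  | nil => rfl
  | append_singleton l x ih =>
      rw [List.foldl_append, List.foldl_cons, List.foldl_nil, ih]
      simp only [List.filter_append, List.filter_cons, List.filter_nil]
      have hb := hJ x
      revert hb; generalize J x = n; intro hb
      interval_cases n <;>
        simp [List.modify, List.modifyTailIdx_succ_cons, List.modifyTailIdx_zero,
          List.modifyHead_cons]

-- ===== VERDICT =====
theorem organize_sub_summaries_by_topic_py_spec : Claim_equal_organize_sub_summaries_by_topic_py := by
  intro sub_summaries sub_tasks _
  unfold Spec_organize_sub_summaries_by_topic_py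
  unfold organize_sub_summaries_by_topic_py organize_sub_summaries_by_topic_py_alt
  rw [PySem.List.foldl_append_singleton_eq_map (fun (is : Int × String) => (pvTopicAt sub_tasks is.1, is.2))]
  rw [List.nil_append]
  have hstep :
      (fun (bs : List (List (String × String))) (is : Int × String) =>
        let topic := altTopic sub_tasks is.1
        let j := altFindJ altKeys (PySem.Str.lower topic)
        bs.modify j (fun b => b ++ [(topic, is.2)])) =
      (fun bs is =>
        bs.modify (altFindJ altKeys (PySem.Str.lower (pvTopicAt sub_tasks is.1, is.2).1))
          (fun b => b ++ [(pvTopicAt sub_tasks is.1, is.2)])) := by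
    funext bs is
    simp [altTopic_eq]
  rw [hstep, ← List.foldl_map
    (f := fun (is : Int × String) => (pvTopicAt sub_tasks is.1, is.2))
    (g := fun (bs : List (List (String × String))) (p : String × String) =>
      bs.modify (altFindJ altKeys (PySem.Str.lower p.1)) (fun b => b ++ [p]))]
  generalize ((PySem.List.enumerate sub_summaries).map
      (fun (is : Int × String) => (pvTopicAt sub_tasks is.1, is.2))) = L
  have hpw : ([altG 0, altG 1, altG 2, altG 3, altG 4, altG 5, altG 6, altG 7, altG 8] : List Int).Pairwise (· < ·) := by decide
  have hA := bucket_sorted (fun pair : String × String => pvPrio pair.1)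
      [altG 0, altG 1, altG 2, altG 3, altG 4, altG 5, altG 6, altG 7, altG 8]
      hpw L (fun pair _ => pvPrio_mem_altG pair.1)
  rw [hA]
  have hB := fold9 (fun pair : String × String => altFindJ altKeys (PySem.Str.lower pair.1))
      (fun pair => altFindJ_lt _) L
  rw [hB]
  have hfil : ∀ j : Nat, j < 9 →
      L.filter (fun pair => pvPrio pair.1 == altG j) =
      L.filter (fun pair => altFindJ altKeys (PySem.Str.lower pair.1) == j) := by
    intro j hj
    apply List.filter_congr
    intro pair _
    rw [prio_eq]
    exact altG_beq _ j (altFindJ_lt _) hj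
  simp only [List.flatMap_cons, List.flatMap_nil, List.append_nil,
    List.foldl_cons, List.foldl_nil, List.nil_append]
  rw [hfil 0 (by norm_num), hfil 1 (by norm_num), hfil 2 (by norm_num), hfil 3 (by norm_num),
    hfil 4 (by norm_num), hfil 5 (by norm_num), hfil 6 (by norm_num), hfil 7 (by norm_num),
    hfil 8 (by norm_num)]
  simp [List.append_assoc]
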